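-- pv_equiv track=rewrite | github.com/gubenkoved/advent-of-code | 2024/dec-17/main2.py | run_4
-- ===== SOURCE A (Python) =====
-- def run_4(reg_a):
--     output = []
--     while True:
--         reg_b = (reg_a % 8) ^ 2
--         reg_b = 3 ^ reg_b ^ (reg_a >> reg_b)
--         output.append(reg_b % 8)
--         reg_a = reg_a >> 3
--         if reg_a == 0:
--             break
--     return tuple(output)
-- ===== SOURCE B (Python) =====
-- # Table-driven: each output digit depends only on a 10-bit window of reg_a
-- # (the shift amount (v%8)^2 is at most 7, so the digit reads bits 0..9 of the
-- # shifted value).  Precompute all 1024 window values once; at run time the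
-- # function only masks, shifts and indexes the table.  The digit count is the
-- # octal-digit count of reg_a, read off the oct() string.
--
-- _TABLE = []
-- for _w in range(1024):
--     _b = (_w % 8) ^ 2
--     _TABLE.append((3 ^ _b ^ (_w >> _b)) % 8)
--
-- def run_4(reg_a):
--     n = len(oct(reg_a)) - 2  # number of octal digits (0 -> 1)
--     return tuple(_TABLE[(reg_a >> (3 * i)) & 1023] for i in range(n))
-- ===== Notes on version B (the rewrite author's own statement) =====
-- stated objective: alternative
-- what changed: Replaces the destructive shift-and-break loop's per-iteration xor arithmetic by a lookup table precomputed once for every ten-bit window value (each digit provably depends on only the low ten bits of the shifted value), indexing it with a mask, with the digit count taken from the length of the octal string.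
import Mathlib
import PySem

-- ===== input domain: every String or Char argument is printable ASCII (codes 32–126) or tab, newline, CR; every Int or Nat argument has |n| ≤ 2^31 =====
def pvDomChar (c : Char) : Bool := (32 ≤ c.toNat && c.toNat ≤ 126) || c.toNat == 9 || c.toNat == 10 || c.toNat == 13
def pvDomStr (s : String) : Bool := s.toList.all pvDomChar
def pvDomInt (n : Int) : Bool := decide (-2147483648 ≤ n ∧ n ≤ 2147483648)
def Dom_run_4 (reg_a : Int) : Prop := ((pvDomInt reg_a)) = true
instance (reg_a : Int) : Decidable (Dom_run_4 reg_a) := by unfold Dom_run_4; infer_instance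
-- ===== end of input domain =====

-- B replaces A's per-iteration xor arithmetic by a lookup table precomputed over all ten-bit
-- window values (each output digit depends only on the low ten bits of the shifted value),
-- with the digit count read off the octal representation (objective: alternative).

-- ===== PORT A =====
-- A's while-True loop, one recursive call per iteration. Python's `x >> k` is Lean's `>>>`;
-- the shift amount (reg_a % 8) ^ 2 is always in [0,7], so `.toNat` is exact.
-- The `else [d]` branch also fires when reg_a >> 3 < 0 (reg_a negative), where the Python
-- loop never terminates — a totality guard outside Pre_run_4, not a behaviour change.
def run_4_loop (reg_a : Int) : List Int :=
  let b0 := PySem.Int.bxor (PySem.Int.mod reg_a 8) 2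
  let reg_b := PySem.Int.bxor (PySem.Int.bxor 3 b0) (reg_a >>> b0.toNat)
  let d := PySem.Int.mod reg_b 8
  if 0 < reg_a >>> (3 : Nat) then d :: run_4_loop (reg_a >>> (3 : Nat)) else [d]
termination_by reg_a.toNat
decreasing_by
  simp_all [Int.shiftRight_eq_div_pow]
  omega

def run_4 (reg_a : Int) : List Int := run_4_loop reg_a

-- ===== PORT B =====
-- Source B's module-level table-building loop (a for-loop appending one entry per window value).
def pvTable : List Int :=
  (List.range 1024).foldl
    (fun acc w =>
      let b := PySem.Int.bxor (PySem.Int.mod (w : Int) 8) 2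
      acc ++ [PySem.Int.mod (PySem.Int.bxor (PySem.Int.bxor 3 b) ((w : Int) >>> b.toNat)) 8])
    []

-- Hand port of `len(oct(reg_a)) - 2`, the octal-digit count: exact for reg_a ≥ 0
-- (negatives are outside Pre_run_4).
def pvOctLen (a : Int) : Nat :=
  if a < 8 then 1 else pvOctLen (a / 8) + 1
termination_by a.toNat
decreasing_by omega

-- Source B's comprehension: the table index (reg_a >> 3*i) & 1023 is always in [0,1024),
-- so `.getD 0` is never taken (it totalises Python's in-range list indexing).
def run_4_alt (reg_a : Int) : List Int :=
  (List.range (pvOctLen reg_a)).map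
    (fun i : Nat => (PySem.List.pyGet? pvTable (PySem.Int.band (reg_a >>> (3 * i)) 1023)).getD 0)

-- ===== PRECONDITION & SPEC =====
-- Pre_ excludes negative reg_a, on which A's loop never terminates (reg_a >> 3 stays negative).
def Pre_run_4 (reg_a : Int) : Prop := 0 ≤ reg_a
instance (reg_a : Int) : Decidable (Pre_run_4 reg_a) := by unfold Pre_run_4; infer_instance
def pvWitness_run_4 : Int := (5)

def Spec_run_4 (reg_a : Int) (out : List Int) : Prop := out = run_4_alt reg_a
instance (reg_a : Int) (out : List Int) : Decidable (Spec_run_4 reg_a out) := by unfold Spec_run_4; infer_instance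

-- ===== CLAIM (what is proved, stated in full; the proofs are below) =====
def Claim_equal_run_4 : Prop := ∀ (reg_a : Int), Dom_run_4 reg_a → Pre_run_4 reg_a → Spec_run_4 reg_a (run_4 reg_a)

-- ===== LEMMAS AND PROOFS =====

-- the per-chunk value A computes inline (proof-side abbreviation, not part of either port)
def pyDigit (v : Int) : Int :=
  let b0 := PySem.Int.bxor (PySem.Int.mod v 8) 2
  PySem.Int.mod (PySem.Int.bxor (PySem.Int.bxor 3 b0) (v >>> b0.toNat)) 8

theorem run4_loop_unfold (a : Int) :
    run_4_loop a
      = if 0 < a >>> (3 : Nat) then pyDigit a :: run_4_loop (a >>> (3 : Nat)) else [pyDigit a] := by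
  rw [run_4_loop.eq_def]; rfl

set_option maxRecDepth 8192 in
theorem pvTable_eq_map :
    pvTable = (List.range 1024).map (fun w : Nat => pyDigit (w : Int)) := by
  unfold pvTable
  exact (PySem.List.foldl_append_singleton_eq_map _ _ _).trans (List.nil_append _)

theorem run4_table_lookup (w : Nat) (h : w < 1024) :
    (PySem.List.pyGet? pvTable (w : Int)).getD 0 = pyDigit (w : Int) := by
  rw [pvTable_eq_map, PySem.List.pyGet?_natCast]
  simp [h]

-- pyDigit on a cast natural, as a pure Nat computation
theorem run4_pyDigit_natCast (v : Nat) :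
    pyDigit (v : Int)
      = (((3 ^^^ ((v % 8) ^^^ 2) ^^^ (v >>> ((v % 8) ^^^ 2))) % 8 : Nat) : Int) := by
  unfold pyDigit
  rw [show (8:Int) = ((8:Nat):Int) from rfl, show (2:Int) = ((2:Nat):Int) from rfl,
      show (3:Int) = ((3:Nat):Int) from rfl]
  simp only [PySem.Int.mod_natCast, PySem.Int.bxor_natCast, Int.toNat_natCast]
  rw [← Int.natCast_shiftRight]
  simp only [PySem.Int.bxor_natCast, PySem.Int.mod_natCast]

theorem run4_xor8 (a x y : Nat) (h : x % 8 = y % 8) : (a ^^^ x) % 8 = (a ^^^ y) % 8 := by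
  rw [show (8:Nat) = 2^3 from rfl] at *
  rw [Nat.xor_mod_two_pow, Nat.xor_mod_two_pow, h]

-- the digit reads only the low 10 bits of its argument (the shift amount is at most 7)
theorem run4_window_nat (m : Nat) :
    (3 ^^^ ((m % 8) ^^^ 2) ^^^ (m >>> ((m % 8) ^^^ 2))) % 8
      = (3 ^^^ (((m % 1024) % 8) ^^^ 2) ^^^ ((m % 1024) >>> (((m % 1024) % 8) ^^^ 2))) % 8 := by
  rw [show (m % 1024) % 8 = m % 8 by omega]
  have hc : (m % 8) ^^^ 2 < 8 :=
    Nat.xor_lt_two_pow (n := 3) (Nat.mod_lt _ (by norm_num)) (by norm_num)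
  set c := (m % 8) ^^^ 2 with hcdef
  interval_cases c <;>
    · apply run4_xor8
      simp only [Nat.shiftRight_eq_div_pow]
      norm_num
      try omega

theorem run4_digit_window (m : Nat) :
    pyDigit ((m % 1024 : Nat) : Int) = pyDigit ((m : Nat) : Int) := by
  rw [run4_pyDigit_natCast, run4_pyDigit_natCast]
  exact congrArg (fun n : Nat => (n : Int)) (run4_window_nat m).symm

theorem run4_mask (m : Nat) :
    PySem.Int.band ((m : Nat) : Int) 1023 = ((m % 1024 : Nat) : Int) := by
  rw [show (1023 : Int) = ((1023 : Nat) : Int) from rfl, PySem.Int.band_natCast]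
  congr 1
  rw [show (1023:Nat) = 2^10 - 1 from rfl, Nat.and_two_pow_sub_one_eq_mod]

theorem run4_lookup_digit (v : Nat) :
    (PySem.List.pyGet? pvTable (PySem.Int.band ((v : Nat) : Int) 1023)).getD 0
      = pyDigit ((v : Nat) : Int) := by
  rw [run4_mask, run4_table_lookup (v % 1024) (by omega), run4_digit_window]

theorem run4_shift3 (m : Nat) : ((m : Int) >>> (3 : Nat)) = ((m / 8 : Nat) : Int) := by
  rw [Int.shiftRight_eq_div_pow, Int.natCast_div]

theorem run4_octLen_small (m : Nat) (h : m < 8) : pvOctLen (m : Int) = 1 := by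
  rw [pvOctLen.eq_def, if_pos (by exact_mod_cast h)]

theorem run4_octLen_step (m : Nat) (h : 8 ≤ m) :
    pvOctLen (m : Int) = pvOctLen ((m / 8 : Nat) : Int) + 1 := by
  have hd : ((m : Int) / 8) = ((m / 8 : Nat) : Int) := by
    exact_mod_cast (Int.natCast_div m 8).symm
  rw [pvOctLen.eq_def, if_neg (by exact_mod_cast Nat.not_lt.mpr h), hd]

theorem run4_shift_succ (m i : Nat) :
    ((m : Int) >>> (3 * (i + 1)) : Int) = (((m / 8 : Nat) : Int) >>> (3 * i)) := by
  have h3 : 3 * (i + 1) = 3 + 3 * i := by ring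
  rw [h3, Int.shiftRight_add, run4_shift3 m]

theorem run4_key (m : Nat) : run_4_loop (m : Int) = run_4_alt (m : Int) := by
  induction m using Nat.strong_induction_on with
  | _ m ih =>
    by_cases h8 : m < 8
    · have hz : ((m : Int) >>> (3 : Nat)) = 0 := by
        rw [run4_shift3, Nat.div_eq_of_lt h8]; rfl
      rw [run4_loop_unfold, hz, run_4_alt.eq_def, run4_octLen_small m h8]
      simp only [lt_irrefl, if_false, List.range_one, List.map_cons, List.map_nil,
        Nat.mul_zero, Int.shiftRight_zero]
      rw [run4_lookup_digit m]
    · have hstep := run4_shift3 m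
      have hpos : (0 : Int) < (m : Int) >>> (3 : Nat) := by
        rw [hstep]; exact_mod_cast Nat.pos_of_ne_zero (by omega)
      have htail :
          (List.range (pvOctLen ((m / 8 : Nat) : Int))).map
              (fun i : Nat =>
                (PySem.List.pyGet? pvTable
                    (PySem.Int.band (((m / 8 : Nat) : Int) >>> (3 * i)) 1023)).getD 0)
            = (List.range (pvOctLen ((m / 8 : Nat) : Int))).map
              ((fun i : Nat =>
                (PySem.List.pyGet? pvTable
                    (PySem.Int.band ((m : Int) >>> (3 * i)) 1023)).getD 0) ∘ Nat.succ) :=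
        List.map_congr_left (fun i _ => by
          simp only [Function.comp_apply]
          rw [run4_shift_succ m i])
      rw [run4_loop_unfold, if_pos hpos, hstep, ih (m / 8) (by omega),
          run_4_alt.eq_def, run_4_alt.eq_def,
          run4_octLen_step m (by omega), List.range_succ_eq_map, List.map_cons, List.map_map,
          htail]
      refine congrArg₂ List.cons ?_ rfl
      rw [show (3 * 0 : Nat) = 0 from rfl, Int.shiftRight_zero]
      exact (run4_lookup_digit m).symm

-- ===== VERDICT (by name: the statement is the Claim_ definition above) =====
theorem run_4_spec : Claim_equal_run_4 := by
  intro reg_a _ hpre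
  unfold Spec_run_4 run_4
  have h : reg_a = ((reg_a.toNat : Nat) : Int) := (Int.toNat_of_nonneg hpre).symm
  rw [h]
  exact run4_key reg_a.toNat
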